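-- pv_equiv track=rewrite | github.com/HenryHelstad/portscanner | scan.py | wildcardReplace
-- ===== SOURCE A (Python) =====
-- def wildcardReplace(inputArr):
--     ret = []
--     if inputArr[0].count("*") == 0 :
--         return inputArr
--
--     for i in inputArr:
--         chopIP = i.split("*",1)
--
--         for j in range(0, 256):
--             if len(chopIP) > 1:
--                 ret.append( chopIP[0] + str(j) + chopIP[1])
--             else:
--                 ret.append(chopIP[0] + str(j))
--     if ret[0].count("*") != 0 :
--         return wildcardReplace(ret)
--     return ret
-- ===== SOURCE B (Python) =====
-- def wildcardReplace(inputArr):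
--     k = inputArr[0].count("*")
--     if k == 0:
--         return inputArr
--     digits = [str(j) for j in range(256)]
--     out = []
--     for s in inputArr:
--         block = [s]
--         for _ in range(k):
--             new = []
--             for x in block:
--                 head, _, tail = x.partition("*")
--                 new.extend([head + d + tail for d in digits])
--             block = new
--         out.extend(block)
--     return out
-- ===== Notes on version B (the rewrite author's own statement) =====
-- stated objective: alternative
-- what changed: A expands breadth-first over the whole list by tail recursion, re-checking element 0 and rebuilding the entire (exponentially growing) list once per wildcard; B reads element 0's wildcard count k once, precomputes the 256 digit strings, and expands each input string independently for k local rounds (str.partition instead of split), concatenating the finished blocks.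
import Mathlib
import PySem

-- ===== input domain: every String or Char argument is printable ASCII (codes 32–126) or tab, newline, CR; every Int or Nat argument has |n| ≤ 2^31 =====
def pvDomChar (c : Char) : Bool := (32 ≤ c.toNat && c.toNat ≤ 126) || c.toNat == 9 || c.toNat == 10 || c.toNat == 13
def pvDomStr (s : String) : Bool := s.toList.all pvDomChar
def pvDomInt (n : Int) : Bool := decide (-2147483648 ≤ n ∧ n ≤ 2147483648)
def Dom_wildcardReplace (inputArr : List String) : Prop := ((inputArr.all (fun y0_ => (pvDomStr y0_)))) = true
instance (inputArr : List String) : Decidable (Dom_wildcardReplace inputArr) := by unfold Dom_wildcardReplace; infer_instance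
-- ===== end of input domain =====

-- B replaces A's global tail recursion (one whole-list rebuild per wildcard of element 0, with a
-- re-check of element 0 each round) by reading that wildcard count k once and expanding each input
-- string independently for k local rounds; alternative decomposition, same output.

-- ===== PORT A =====
-- one breadth-first pass: the double loop of A's body (split('*',1), then j in range(256))
def wildAPass (arr : List String) : List String :=
  arr.foldl (fun ret i =>
    let chop := (PySem.Str.splitMax? i "*" 1).getD []   -- sep "*" ≠ "", so never none; getD is a totality guard
    (PySem.List.pyRange 0 256 1).foldl (fun ret j =>
      if chop.length > 1 then
        ret ++ [PySem.List.pyGetD chop 0 "" ++ PySem.Int.toStr j ++ PySem.List.pyGetD chop 1 ""]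
      else
        ret ++ [PySem.List.pyGetD chop 0 "" ++ PySem.Int.toStr j]) ret) []

-- A's tail recursion; fuel is a totality guard ONLY: each pass removes one '*' from element 0
-- (proved below in wildA_eq_iterN), so the fuel chosen in wildcardReplace is never exhausted.
def wildA : Nat → List String → List String
  | 0, arr => arr
  | fuel+1, arr =>
    if PySem.Str.count (PySem.List.pyGetD arr 0 "") "*" = 0 then arr
    else
      let ret := wildAPass arr
      if PySem.Str.count (PySem.List.pyGetD ret 0 "") "*" ≠ 0 then wildA fuel ret
      else ret

def wildcardReplace (inputArr : List String) : List String :=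
  wildA (PySem.Str.count (PySem.List.pyGetD inputArr 0 "") "*" + 1) inputArr

-- ===== PORT B =====
-- hand port of s.partition('*') on code points (exact; the middle component is unused by B, so dropped)
def partStar : List Char → List Char × List Char
  | [] => ([], [])
  | c :: rest =>
    if c = '*' then ([], rest)
    else
      let p := partStar rest
      (c :: p.1, p.2)

-- str(j) for j in range(256), built once
def wildBDigits : List String := (PySem.List.pyRange 0 256 1).map PySem.Int.toStr

-- one local round for one block: x.partition('*') and the inner comprehension
def wildBRound (block : List String) : List String :=
  block.foldl (fun new x =>
    let p := partStar x.toList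
    new ++ wildBDigits.map (fun d => String.ofList p.1 ++ d ++ String.ofList p.2)) []

-- 'for _ in range(k): block = new'
def wildBBlocks : Nat → List String → List String
  | 0, block => block
  | k+1, block => wildBBlocks k (wildBRound block)

def wildcardReplace_alt (inputArr : List String) : List String :=
  let k := PySem.Str.count (PySem.List.pyGetD inputArr 0 "") "*"
  if k = 0 then inputArr
  else inputArr.foldl (fun out s => out ++ wildBBlocks k [s]) []

-- ===== PRECONDITION & SPEC =====
-- Pre_ excludes only the empty list, on which Python A raises IndexError at inputArr[0].
def Pre_wildcardReplace (inputArr : List String) : Prop := inputArr ≠ []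
instance (inputArr : List String) : Decidable (Pre_wildcardReplace inputArr) := by
  unfold Pre_wildcardReplace; infer_instance

def pvWitness_wildcardReplace : List String := ["19*.0.0.1", "x"]

def Spec_wildcardReplace (inputArr : List String) (out : List String) : Prop := out = wildcardReplace_alt inputArr
instance (inputArr : List String) (out : List String) : Decidable (Spec_wildcardReplace inputArr out) := by unfold Spec_wildcardReplace; infer_instance

-- ===== CLAIM (what is proved, stated in full; the proofs are below) =====
def Claim_equal_wildcardReplace : Prop := ∀ (inputArr : List String), Dom_wildcardReplace inputArr → Pre_wildcardReplace inputArr → Spec_wildcardReplace inputArr (wildcardReplace inputArr)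

-- ===== LEMMAS AND PROOFS =====

-- partStar spec: no star
theorem partStar_no_star {cs : List Char} (h : '*' ∉ cs) : partStar cs = (cs, []) := by
  induction cs with
  | nil => rfl
  | cons c rest ih =>
    simp only [List.mem_cons, not_or] at h
    rw [partStar, if_neg (fun h' => h.1 h'.symm), ih h.2]

-- partStar spec: with a star, cs = p.1 ++ '*' :: p.2 and '*' ∉ p.1
theorem partStar_star {cs : List Char} (h : '*' ∈ cs) :
    cs = (partStar cs).1 ++ '*' :: (partStar cs).2 ∧ '*' ∉ (partStar cs).1 := by
  induction cs with
  | nil => cases h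
  | cons c rest ih =>
    by_cases hc : c = '*'
    · subst hc; simp [partStar]
    · have hr : '*' ∈ rest := by
        rcases List.mem_cons.mp h with h1 | h1
        · exact absurd h1.symm hc
        · exact h1
      rcases ih hr with ⟨h1, h2⟩
      constructor
      · simp only [partStar, hc, if_false]
        exact congrArg (c :: ·) h1
      · simp [partStar, hc, h2, Ne.symm hc]

-- PySem.Chars.count with the single-char needle '*' is List.count
theorem countGo_star (cs : List Char) : ∀ (fuel acc : Nat), cs.length ≤ fuel →
    PySem.Chars.count.go ['*'] fuel cs acc = acc + cs.count '*' := by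
  induction cs with
  | nil => intro fuel acc _; cases fuel <;> simp [PySem.Chars.count.go]
  | cons c rest ih =>
    intro fuel acc hf
    cases fuel with
    | zero => simp at hf
    | succ f =>
      by_cases hc : c = '*'
      · subst hc
        simp only [PySem.Chars.count.go]
        have hpre : (['*'].isPrefixOf ('*' :: rest)) = true := by
          simp
        rw [hpre]
        simp only [if_true, List.length_singleton, List.drop_one, List.tail_cons]
        rw [ih f (acc + 1) (by simpa using Nat.le_of_succ_le_succ hf)]
        simp
        omega
      · simp only [PySem.Chars.count.go]
        have hpre : (['*'].isPrefixOf (c :: rest)) = false := by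
          simp [List.isPrefixOf_cons₂, Ne.symm hc]
        rw [hpre]
        simp only [if_false, Bool.false_eq_true]
        rw [ih f acc (by simpa using Nat.le_of_succ_le_succ hf)]
        simp [hc]

theorem count_star (s : String) : PySem.Str.count s "*" = s.toList.count '*' := by
  rw [PySem.Str.count_eq]
  show PySem.Chars.count s.toList ['*'] = _
  simp only [PySem.Chars.count, List.isEmpty_cons, if_false, Bool.false_eq_true]
  simpa using countGo_star s.toList s.toList.length 0 le_rfl

-- splitOnMax.go with maxsplit 1 and sep '*', characterized by partStar
theorem splitGo_star (cs : List Char) : ∀ (fuel : Nat) (cur : List Char) (acc : List (List Char)),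
    cs.length < fuel →
    PySem.Chars.splitOnMax.go ['*'] fuel 1 cs cur acc =
      acc.reverse ++ (if '*' ∈ cs then [cur.reverse ++ (partStar cs).1, (partStar cs).2]
                      else [cur.reverse ++ cs]) := by
  induction cs with
  | nil =>
    intro fuel cur acc hf
    cases fuel with
    | zero => simp at hf
    | succ f => simp [PySem.Chars.splitOnMax.go]
  | cons c rest ih =>
    intro fuel cur acc hf
    cases fuel with
    | zero => simp at hf
    | succ f =>
      by_cases hc : c = '*'
      · subst hc
        simp only [PySem.Chars.splitOnMax.go, Nat.one_ne_zero, if_false]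
        have hpre : (['*'].isPrefixOf ('*' :: rest)) = true := by
          simp
        rw [hpre]
        simp only [if_true, List.length_singleton, List.drop_one, List.tail_cons]
        have h10 : (1 : Nat) - 1 = 0 := rfl
        rw [h10]
        -- go with m = 0 returns immediately, whatever the remaining fuel
        have hret : ∀ (f' : Nat) (l : List Char) (a : List (List Char)),
            PySem.Chars.splitOnMax.go ['*'] f' 0 l [] a = (l :: a).reverse := by
          intro f' l a
          cases f' with
          | zero => simp [PySem.Chars.splitOnMax.go]
          | succ g => cases l <;> simp [PySem.Chars.splitOnMax.go]
        rw [hret]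
        simp [partStar]
      · simp only [PySem.Chars.splitOnMax.go, Nat.one_ne_zero, if_false]
        have hpre : (['*'].isPrefixOf (c :: rest)) = false := by
          simp [List.isPrefixOf_cons₂, Ne.symm hc]
        rw [hpre]
        simp only [if_false, Bool.false_eq_true]
        rw [ih f (c :: cur) acc (by simpa using Nat.le_of_succ_le_succ hf)]
        by_cases hm : '*' ∈ rest
        · have hm' : '*' ∈ c :: rest := List.mem_cons_of_mem _ hm
          simp [hm, hm', partStar, hc]
        · have hm' : '*' ∉ c :: rest := by simp [hm, Ne.symm hc]
          simp [hm, hm']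

-- A's chop, in terms of partStar
theorem chop_eq (s : String) :
    (PySem.Str.splitMax? s "*" 1).getD [] =
      (if '*' ∈ s.toList then
        [String.ofList (partStar s.toList).1, String.ofList (partStar s.toList).2]
       else [String.ofList s.toList]) := by
  have h : PySem.Chars.splitMax? s.toList ['*'] 1 =
      some (PySem.Chars.splitOnMax.go ['*'] (s.toList.length + 1) 1 s.toList [] []) := by
    simp [PySem.Chars.splitMax?, PySem.Chars.splitOnMax]
  simp only [PySem.Str.splitMax?]
  show (Option.map (List.map String.ofList)
      (PySem.Chars.splitMax? s.toList "*".toList 1)).getD [] = _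
  have hstar : "*".toList = ['*'] := rfl
  rw [hstar, h, splitGo_star s.toList (s.toList.length + 1) [] [] (Nat.lt_succ_self _)]
  by_cases hm : '*' ∈ s.toList <;> simp [hm]

-- the common child: both programs substitute j for the first '*' (or append to a star-free string)
def pvChild (s : String) (j : Int) : String :=
  String.ofList (partStar s.toList).1 ++ PySem.Int.toStr j ++ String.ofList (partStar s.toList).2

def pvChildren (s : String) : List String :=
  (PySem.List.pyRange 0 256 1).map (pvChild s)

-- one pass of A is flatMap of children
theorem wildAPass_eq (arr : List String) : wildAPass arr = arr.flatMap pvChildren := by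
  induction arr using List.reverseRecOn with
  | nil => rfl
  | append_singleton init s ih =>
    rw [wildAPass, List.foldl_append]
    rw [show init.foldl _ [] = wildAPass init from rfl, ih]
    simp only [List.foldl_cons, List.foldl_nil, List.flatMap_append, List.flatMap_cons,
      List.flatMap_nil, List.append_nil]
    rw [chop_eq]
    by_cases hm : '*' ∈ s.toList
    · simp only [hm, if_true]
      have hfun : (fun (ret : List String) (j : Int) =>
          if ([String.ofList (partStar s.toList).1, String.ofList (partStar s.toList).2] : List String).length > 1 then
            ret ++ [PySem.List.pyGetD [String.ofList (partStar s.toList).1, String.ofList (partStar s.toList).2] 0 "" ++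
              PySem.Int.toStr j ++ PySem.List.pyGetD [String.ofList (partStar s.toList).1, String.ofList (partStar s.toList).2] 1 ""]
          else ret ++ [PySem.List.pyGetD [String.ofList (partStar s.toList).1, String.ofList (partStar s.toList).2] 0 "" ++
              PySem.Int.toStr j]) = fun ret j => ret ++ [pvChild s j] := by
        funext ret j
        simp [PySem.List.pyGetD, pvChild]
      rw [hfun, PySem.List.foldl_append_singleton_eq_map]
      rfl
    · simp only [hm, if_false]
      have hp : partStar s.toList = (s.toList, []) := partStar_no_star hm
      have hfun : (fun (ret : List String) (j : Int) =>
          if ([String.ofList s.toList] : List String).length > 1 then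
            ret ++ [PySem.List.pyGetD [String.ofList s.toList] 0 "" ++
              PySem.Int.toStr j ++ PySem.List.pyGetD [String.ofList s.toList] 1 ""]
          else ret ++ [PySem.List.pyGetD [String.ofList s.toList] 0 "" ++ PySem.Int.toStr j]) =
          fun ret j => ret ++ [pvChild s j] := by
        funext ret j
        simp only [List.length_singleton, gt_iff_lt, Nat.lt_irrefl, if_false]
        simp [PySem.List.pyGetD, pvChild, hp]
      rw [hfun, PySem.List.foldl_append_singleton_eq_map]
      rfl

-- iterated passes of A
def iterN : Nat → List String → List String
  | 0, arr => arr
  | n+1, arr => iterN n (wildAPass arr)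

-- iterN distributes over the elements
theorem iterN_flatMap (n : Nat) : ∀ (xs : List String),
    iterN n xs = xs.flatMap (fun t => iterN n [t]) := by
  induction n with
  | zero => intro xs; simp [iterN]
  | succ n ihn =>
    intro xs
    show iterN n (wildAPass xs) = _
    rw [ihn (wildAPass xs), wildAPass_eq, List.flatMap_assoc]
    apply List.flatMap_congr
    intro t _
    show _ = iterN n (wildAPass [t])
    rw [ihn (wildAPass [t]), wildAPass_eq]
    simp

-- one B round is one A pass: both are flatMap of the children
theorem wildBRound_eq (block : List String) : wildBRound block = block.flatMap pvChildren := by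
  unfold wildBRound
  rw [PySem.List.foldl_append_eq_flatMap]
  simp only [List.nil_append]
  apply List.flatMap_congr
  intro x _
  simp [wildBDigits, List.map_map, pvChildren, pvChild, Function.comp]

-- k B rounds are k A passes
theorem wildBBlocks_eq (k : Nat) : ∀ (block : List String),
    wildBBlocks k block = iterN k block := by
  induction k with
  | zero => intro block; rfl
  | succ k ih =>
    intro block
    show wildBBlocks k (wildBRound block) = iterN k (wildAPass block)
    rw [ih, wildBRound_eq, wildAPass_eq]

-- head of one pass: the j = 0 child of the head
theorem head_pass (s : String) (rest : List String) :
    PySem.List.pyGetD (wildAPass (s :: rest)) 0 "" = pvChild s 0 := by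
  rw [wildAPass_eq]
  simp only [List.flatMap_cons, pvChildren]
  rw [PySem.List.pyRange_one_cons (by norm_num)]
  simp [PySem.List.pyGetD]

-- each pass removes exactly one '*' from element 0
theorem count_child_zero {s : String} (h : 0 < s.toList.count '*') :
    (pvChild s 0).toList.count '*' = s.toList.count '*' - 1 := by
  have hm : '*' ∈ s.toList := List.count_pos_iff.mp h
  rcases partStar_star hm with ⟨hsplit, hnst⟩
  have h1 : (partStar s.toList).1.count '*' = 0 := List.count_eq_zero.mpr hnst
  have hlist : (pvChild s 0).toList = (partStar s.toList).1 ++ '0' :: (partStar s.toList).2 := by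
    simp [pvChild, show PySem.Int.toStr 0 = "0" from rfl, String.toList_append, String.toList_ofList]
  rw [hlist]
  conv_rhs => rw [hsplit]
  simp [List.count_append, h1]

-- main A-side lemma: with k stars in element 0 and enough fuel, A computes exactly k passes
theorem wildA_eq_iterN : ∀ (k fuel : Nat) (arr : List String),
    (PySem.List.pyGetD arr 0 "").toList.count '*' = k → k < fuel →
    wildA fuel arr = iterN k arr := by
  intro k
  induction k with
  | zero =>
    intro fuel arr hk hf
    cases fuel with
    | zero => omega
    | succ f =>
      have hc0 : PySem.Str.count (PySem.List.pyGetD arr 0 "") "*" = 0 := by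
        rw [count_star, hk]
      simp only [wildA]
      rw [if_pos hc0]
      rfl
  | succ k ih =>
    intro fuel arr hk hf
    cases fuel with
    | zero => omega
    | succ f =>
      rcases arr with _ | ⟨s, rest⟩
      · rw [show PySem.List.pyGetD ([] : List String) 0 "" = "" from rfl] at hk
        simp at hk
      have hhead : PySem.List.pyGetD (s :: rest) 0 "" = s := by
        simp [PySem.List.pyGetD]
      rw [hhead] at hk
      have hcnt : PySem.Str.count (PySem.List.pyGetD (s :: rest) 0 "") "*" = k + 1 := by
        rw [hhead, count_star, hk]
      have hret : (PySem.List.pyGetD (wildAPass (s :: rest)) 0 "").toList.count '*' = k := by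
        rw [head_pass, count_child_zero (by omega), hk]
        omega
      have hretc : PySem.Str.count (PySem.List.pyGetD (wildAPass (s :: rest)) 0 "") "*" = k := by
        rw [count_star, hret]
      simp only [wildA, hcnt, Nat.succ_ne_zero, if_false]
      by_cases hkz : k = 0
      · subst hkz
        simp only [hretc, ne_eq, not_true_eq_false, if_false]
        show wildAPass (s :: rest) = iterN 1 (s :: rest)
        rfl
      · have hne : (PySem.Str.count (PySem.List.pyGetD (wildAPass (s :: rest)) 0 "") "*" ≠ 0) := by
          rw [hretc]; exact hkz
        simp only [hne, ne_eq, not_false_eq_true, if_true]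
        rw [ih f (wildAPass (s :: rest)) hret (by omega)]
        rfl

-- B in iterN form
theorem alt_eq_iterN (arr : List String) (k : Nat)
    (hk : (PySem.List.pyGetD arr 0 "").toList.count '*' = k) :
    wildcardReplace_alt arr = iterN k arr := by
  have hcnt : PySem.Str.count (PySem.List.pyGetD arr 0 "") "*" = k := by
    rw [count_star, hk]
  have hbody : wildcardReplace_alt arr =
      (if PySem.Str.count (PySem.List.pyGetD arr 0 "") "*" = 0 then arr
       else arr.foldl (fun out s =>
         out ++ wildBBlocks (PySem.Str.count (PySem.List.pyGetD arr 0 "") "*") [s]) []) := rfl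
  by_cases hkz : k = 0
  · subst hkz
    rw [hbody, if_pos hcnt]
    rfl
  · rw [hbody, if_neg (by rw [hcnt]; exact hkz), hcnt]
    rw [PySem.List.foldl_append_eq_flatMap]
    simp only [List.nil_append]
    rw [iterN_flatMap k arr]
    exact List.flatMap_congr (fun s _ => wildBBlocks_eq k [s])

-- ===== VERDICT (by name: the statement is the Claim_ definition above) =====
theorem wildcardReplace_spec : Claim_equal_wildcardReplace := by
  intro inputArr _ _
  unfold Spec_wildcardReplace
  have hA : wildcardReplace inputArr = iterN ((PySem.List.pyGetD inputArr 0 "").toList.count '*') inputArr := by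
    unfold wildcardReplace
    rw [count_star]
    exact wildA_eq_iterN _ _ inputArr rfl (Nat.lt_succ_self _)
  rw [hA, alt_eq_iterN inputArr _ rfl]
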